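-- pv_equiv track=rewrite | github.com/mm3509/b9122 | 3-assignments/assignment-5/solution_6_gross_value_triplets_msfe.py | find_triplets_medium
-- ===== SOURCE A (Python) =====
-- def find_triplets_medium(alist):
--     # Here is one way to make this faster, even though it's not enough.
--
--     # The optimal indices will always be at sign flips, when one element is
--     # positive and the other is negative or one element is negative and the
--     # other is positive (otherwise, the gross value increases by incrementing
--     # the index, lengthening a running sum with a plus sign in front, or
--     # lengthening a negative sum with a minus sign in front). So restrict the
--     # search to those indices.
--
--     n = len(alist)
--     sign_flips = []
--
--     for i in range(1, n):
--         if alist[i] * alist[i - 1] <= 0: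
--             sign_flips.append(i)
--
--     markers = [0] + sign_flips + [n]
--
--     m = len(markers)
--     maximum = sum(alist)
--     for i_marker in range(m):
--         i = markers[i_marker]
--
--         for j_marker in range(i_marker, m):
--             j = markers[j_marker]
--
--             for k_marker in range(j_marker, m):
--                 k = markers[k_marker]
--
--                 value = (sum(alist[:i])
--                          - sum(alist[i:j])
--                          + sum(alist[j:k])
--                          - sum(alist[k:]))
--
--                 if value > maximum:
--                     maximum = value
--
--     return maximum
-- ===== SOURCE B (Python) =====
-- def find_triplets_medium(alist):
--     # value(i,j,k) = sum[:i] - sum[i:j] + sum[j:k] - sum[k:] = 2*(P_i - P_j + P_k) - total,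
--     # maximized over marker positions i <= j <= k (0, sign flips, n) by a one-pass DP
--     # over the prefix sums at those markers.
--     total = sum(alist)
--     best_i = 0      # max P_i over markers seen so far (marker 0 has P_0 = 0)
--     best_ij = 0     # max P_i - P_j over markers i <= j seen so far
--     best_ijk = 0    # max P_i - P_j + P_k over markers i <= j <= k seen so far
--     prefix = 0
--     prev = None
--     for x in alist:
--         if prev is not None and x * prev <= 0:
--             best_i = max(best_i, prefix)
--             best_ij = max(best_ij, best_i - prefix)
--             best_ijk = max(best_ijk, best_ij + prefix)
--         prefix += x
--         prev = x
--     # final marker at n, where the prefix sum is total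
--     best_i = max(best_i, prefix)
--     best_ij = max(best_ij, best_i - prefix)
--     best_ijk = max(best_ijk, best_ij + prefix)
--     return 2 * best_ijk - total
-- ===== Notes on version B (the rewrite author's own statement) =====
-- stated objective: faster
-- what changed: Replaces A's cubic scan over all marker triples (each recomputing four slice sums) by a single linear pass that maintains prefix sums and a three-state DP maximizing P_i - P_j + P_k over sign-flip markers, using value(i,j,k) = 2*(P_i - P_j + P_k) - total.
import Mathlib
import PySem

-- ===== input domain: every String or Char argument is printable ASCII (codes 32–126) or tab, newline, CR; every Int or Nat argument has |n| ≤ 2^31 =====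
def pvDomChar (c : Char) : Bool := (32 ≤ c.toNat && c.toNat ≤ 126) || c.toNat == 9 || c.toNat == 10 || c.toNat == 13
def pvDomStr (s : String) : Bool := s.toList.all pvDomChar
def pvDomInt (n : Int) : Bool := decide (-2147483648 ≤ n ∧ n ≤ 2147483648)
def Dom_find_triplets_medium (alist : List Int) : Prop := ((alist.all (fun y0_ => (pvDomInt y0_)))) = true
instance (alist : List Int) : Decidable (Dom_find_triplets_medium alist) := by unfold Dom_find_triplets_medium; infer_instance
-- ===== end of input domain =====

-- B replaces A's cubic scan over marker triples by one linear DP pass over the prefix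
-- sums at the markers (value(i,j,k) = 2*(P_i - P_j + P_k) - total); objective: faster.

-- ===== PORT A =====
def find_triplets_medium (alist : List Int) : Int :=
  let n : Int := PySem.List.len alist
  let sign_flips : List Int :=
    (PySem.List.pyRange 1 n).foldl
      (fun acc i =>
        if PySem.List.pyGetD alist i 0 * PySem.List.pyGetD alist (i - 1) 0 ≤ 0
        then acc ++ [i] else acc) []
  let markers : List Int := [0] ++ sign_flips ++ [n]
  let m : Int := PySem.List.len markers
  (PySem.List.pyRange 0 m).foldl
    (fun maximum i_marker =>
      let i := PySem.List.pyGetD markers i_marker 0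
      (PySem.List.pyRange i_marker m).foldl
        (fun maximum j_marker =>
          let j := PySem.List.pyGetD markers j_marker 0
          (PySem.List.pyRange j_marker m).foldl
            (fun maximum k_marker =>
              let k := PySem.List.pyGetD markers k_marker 0
              let value := (PySem.List.slice alist none (some i)).sum
                - (PySem.List.slice alist (some i) (some j)).sum
                + (PySem.List.slice alist (some j) (some k)).sum
                - (PySem.List.slice alist (some k) none).sum
              if value > maximum then value else maximum)
            maximum)
        maximum)
    alist.sum

-- ===== PORT B =====
-- one DP step: feed the prefix sum q of the next marker into (best_i, best_ij, best_ijk)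
def pvDp3 (b : Int × Int × Int) (q : Int) : Int × Int × Int :=
  let bI := max b.1 q
  let bIJ := max b.2.1 (bI - q)
  let bIJK := max b.2.2 (bIJ + q)
  (bI, bIJ, bIJK)

def find_triplets_medium_alt (alist : List Int) : Int :=
  let total := alist.sum
  let st := alist.foldl
    (fun (s : Int × Option Int × (Int × Int × Int)) x =>
      let b' := match s.2.1 with
        | none => s.2.2
        | some p => if x * p ≤ 0 then pvDp3 s.2.2 s.1 else s.2.2
      (s.1 + x, some x, b'))
    (0, none, (0, 0, 0))
  let bfin := pvDp3 st.2.2 st.1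
  2 * bfin.2.2 - total

-- ===== PRECONDITION & SPEC =====
def Spec_find_triplets_medium (alist : List Int) (out : Int) : Prop := out = find_triplets_medium_alt alist
instance (alist : List Int) (out : Int) : Decidable (Spec_find_triplets_medium alist out) := by unfold Spec_find_triplets_medium; infer_instance

-- ===== CLAIM (what is proved, stated in full; the proofs are below) =====
def Claim_equal_find_triplets_medium : Prop := ∀ (alist : List Int), Dom_find_triplets_medium alist → Spec_find_triplets_medium alist (find_triplets_medium alist)

-- ===== LEMMAS AND PROOFS =====

-- prefix sum of alist up to (clamped) position x
def pvPf (alist : List Int) (x : Int) : Int := (alist.take x.toNat).sum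

-- the value A computes for a marker triple (i, j, k), via Python slices
def pvVSlice (alist : List Int) (i j k : Int) : Int :=
  (PySem.List.slice alist none (some i)).sum
    - (PySem.List.slice alist (some i) (some j)).sum
    + (PySem.List.slice alist (some j) (some k)).sum
    - (PySem.List.slice alist (some k) none).sum

-- A's three nested loops, abstracted: innermost max-fold, then the two tail loops
def pvF3 (g : Int → Int) (acc : Int) (l : List Int) : Int :=
  l.foldl (fun a q => if g q > a then g q else a) acc

def pvF2 (g : Int → Int → Int) (acc : Int) : List Int → Int
  | [] => acc
  | q :: t => pvF2 g (pvF3 (g q) acc (q :: t)) t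

def pvF1 (g : Int → Int → Int → Int) (acc : Int) : List Int → Int
  | [] => acc
  | q :: t => pvF1 g (pvF2 (g q) acc (q :: t)) t

-- prefix sums at the sign-flip positions of a list, given previous element and running prefix
def pvFlipVals (prev p : Int) : List Int → List Int
  | [] => []
  | x :: t => (if x * prev ≤ 0 then [p] else []) ++ pvFlipVals x (p + x) t

-- A's sign-flip scan and marker list, named for the proofs
def pvFlips (alist : List Int) : List Int :=
  (PySem.List.pyRange 1 (PySem.List.len alist)).foldl
    (fun acc i =>
      if PySem.List.pyGetD alist i 0 * PySem.List.pyGetD alist (i - 1) 0 ≤ 0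
      then acc ++ [i] else acc) []

def pvMarkers (alist : List Int) : List Int := [0] ++ pvFlips alist ++ [PySem.List.len alist]

lemma pvPyRange_nil {a b : Int} (h : b ≤ a) : PySem.List.pyRange a b = [] := by
  simp [PySem.List.pyRange]; intro h2; omega

lemma pvSliceSum (alist : List Int) {i j : Int} (h0 : 0 ≤ i) (hij : i ≤ j) :
    (PySem.List.slice alist (some i) (some j)).sum = pvPf alist j - pvPf alist i := by
  obtain ⟨i', rfl⟩ : ∃ i' : Nat, i = (i' : Int) := ⟨i.toNat, (Int.toNat_of_nonneg h0).symm⟩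
  obtain ⟨j', rfl⟩ : ∃ j' : Nat, j = (j' : Int) := ⟨j.toNat, (Int.toNat_of_nonneg (le_trans h0 hij)).symm⟩
  have hij' : i' ≤ j' := by exact_mod_cast hij
  rw [PySem.List.slice_natCast, ← List.drop_take]
  have h := List.sum_take_add_sum_drop (List.take j' alist) i'
  rw [List.take_take, min_eq_left hij'] at h
  simp only [pvPf, Int.toNat_natCast]
  omega

lemma pvVSlice_eq (alist : List Int) {i j k : Int} (h0 : 0 ≤ i) (hij : i ≤ j) (hjk : j ≤ k) :
    pvVSlice alist i j k = 2 * (pvPf alist i - pvPf alist j + pvPf alist k) - alist.sum := by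
  have h0j : 0 ≤ j := le_trans h0 hij
  have h0k : 0 ≤ k := le_trans h0j hjk
  have h1 : (PySem.List.slice alist none (some i)).sum = pvPf alist i := by
    rw [PySem.List.slice_to alist h0]; rfl
  have h4 : (PySem.List.slice alist (some k) none).sum = alist.sum - pvPf alist k := by
    rw [PySem.List.slice_from alist h0k]
    have h := List.sum_take_add_sum_drop alist k.toNat
    simp only [pvPf]; omega
  rw [pvVSlice, h1, h4, pvSliceSum alist h0 hij, pvSliceSum alist h0j hjk]
  ring

lemma pvF3_char (g : Int → Int) (l : List Int) : ∀ acc : Int,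
    acc ≤ pvF3 g acc l ∧ (∀ q ∈ l, g q ≤ pvF3 g acc l) ∧
    (pvF3 g acc l = acc ∨ ∃ q ∈ l, pvF3 g acc l = g q) := by
  induction l with
  | nil => intro acc; refine ⟨le_refl _, by simp [pvF3], Or.inl rfl⟩
  | cons q t ih =>
    intro acc
    have hstep : pvF3 g acc (q :: t) = pvF3 g (if g q > acc then g q else acc) t := by
      simp [pvF3]
    obtain ⟨ih1, ih2, ih3⟩ := ih (if g q > acc then g q else acc)
    rw [hstep]
    refine ⟨le_trans (by split_ifs with h <;> omega) ih1, ?_, ?_⟩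
    · intro q' hq'
      rcases List.mem_cons.mp hq' with h | h
      · subst h; exact le_trans (by split_ifs with h <;> omega) ih1
      · exact ih2 q' h
    · rcases ih3 with h | ⟨q', hq', he⟩
      · rw [h]; split_ifs with hgt
        · exact Or.inr ⟨q, List.mem_cons_self .., rfl⟩
        · exact Or.inl rfl
      · exact Or.inr ⟨q', List.mem_cons_of_mem _ hq', he⟩

lemma pvF2_char (g : Int → Int → Int) (l : List Int) : ∀ acc : Int,
    acc ≤ pvF2 g acc l ∧
    (∀ j k : Nat, j ≤ k → k < l.length → g (l.getD j 0) (l.getD k 0) ≤ pvF2 g acc l) ∧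
    (pvF2 g acc l = acc ∨ ∃ j k : Nat, j ≤ k ∧ k < l.length ∧ pvF2 g acc l = g (l.getD j 0) (l.getD k 0)) := by
  induction l with
  | nil => intro acc; exact ⟨le_refl _, by simp, Or.inl rfl⟩
  | cons q t ih =>
    intro acc
    have hstep : pvF2 g acc (q :: t) = pvF2 g (pvF3 (g q) acc (q :: t)) t := rfl
    obtain ⟨h31, h32, h33⟩ := pvF3_char (g q) (q :: t) acc
    obtain ⟨ih1, ih2, ih3⟩ := ih (pvF3 (g q) acc (q :: t))
    rw [hstep]
    refine ⟨le_trans h31 ih1, ?_, ?_⟩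
    · intro j k hjk hk
      match j, k with
      | 0, k =>
        have hmem : (q :: t).getD k 0 ∈ q :: t := by
          rw [List.getD_eq_getElem _ _ hk]; exact List.getElem_mem hk
        exact le_trans (h32 _ hmem) ih1
      | j + 1, k + 1 =>
        simp only [List.getD_cons_succ]
        exact ih2 j k (by omega) (by simpa using hk)
    · rcases ih3 with h | ⟨j, k, hjk, hk, he⟩
      · rw [h]
        rcases h33 with h' | ⟨q3, hq3, he'⟩
        · exact Or.inl h'
        · obtain ⟨k, hk, hgk⟩ := List.mem_iff_getElem.mp hq3
          refine Or.inr ⟨0, k, Nat.zero_le _, hk, ?_⟩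
          rw [List.getD_cons_zero, List.getD_eq_getElem _ _ hk, hgk]; exact he'
      · refine Or.inr ⟨j + 1, k + 1, by omega, by simpa using hk, ?_⟩
        simpa only [List.getD_cons_succ] using he

lemma pvF1_char (g : Int → Int → Int → Int) (l : List Int) : ∀ acc : Int,
    acc ≤ pvF1 g acc l ∧
    (∀ i j k : Nat, i ≤ j → j ≤ k → k < l.length →
      g (l.getD i 0) (l.getD j 0) (l.getD k 0) ≤ pvF1 g acc l) ∧
    (pvF1 g acc l = acc ∨ ∃ i j k : Nat, i ≤ j ∧ j ≤ k ∧ k < l.length ∧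
      pvF1 g acc l = g (l.getD i 0) (l.getD j 0) (l.getD k 0)) := by
  induction l with
  | nil => intro acc; exact ⟨le_refl _, by simp, Or.inl rfl⟩
  | cons q t ih =>
    intro acc
    have hstep : pvF1 g acc (q :: t) = pvF1 g (pvF2 (g q) acc (q :: t)) t := rfl
    obtain ⟨h21, h22, h23⟩ := pvF2_char (g q) (q :: t) acc
    obtain ⟨ih1, ih2, ih3⟩ := ih (pvF2 (g q) acc (q :: t))
    rw [hstep]
    refine ⟨le_trans h21 ih1, ?_, ?_⟩
    · intro i j k hij hjk hk
      match i, j, k with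
      | 0, j, k => exact le_trans (h22 j k hjk hk) ih1
      | i + 1, j + 1, k + 1 =>
        simp only [List.getD_cons_succ]
        exact ih2 i j k (by omega) (by omega) (by simpa using hk)
    · rcases ih3 with h | ⟨i, j, k, hij, hjk, hk, he⟩
      · rw [h]
        rcases h23 with h' | ⟨j, k, hjk, hk, he'⟩
        · exact Or.inl h'
        · exact Or.inr ⟨0, j, k, Nat.zero_le _, hjk, hk, by simpa using he'⟩
      · refine Or.inr ⟨i + 1, j + 1, k + 1, by omega, by omega, by simpa using hk, ?_⟩
        simpa only [List.getD_cons_succ] using he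

lemma pvLoop2 (ms : List Int) (g2 : Int → Int → Int) :
    ∀ (fuel : Nat) (a : Nat), ms.length - a = fuel → a ≤ ms.length → ∀ (acc : Int),
    (PySem.List.pyRange a ms.length).foldl
      (fun r jm => pvF3 (g2 (PySem.List.pyGetD ms jm 0)) r (ms.drop jm.toNat)) acc
    = pvF2 g2 acc (ms.drop a) := by
  intro fuel
  induction fuel with
  | zero =>
    intro a hf ha acc
    have : a = ms.length := by omega
    subst this
    rw [pvPyRange_nil (le_refl _), List.drop_length]
    rfl
  | succ n ih =>
    intro a hf ha acc
    have hlt : a < ms.length := by omega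
    rw [PySem.List.pyRange_one_cons (by exact_mod_cast hlt), List.foldl_cons]
    have hcast : ((a : Int) + 1) = ((a + 1 : Nat) : Int) := by push_cast; ring
    have hdrop : ms.drop a = ms.getD a 0 :: ms.drop (a + 1) := by
      rw [List.drop_eq_getElem_cons hlt, List.getD_eq_getElem _ _ hlt]
    rw [hcast, ih (a + 1) (by omega) (by omega),
        PySem.List.pyGetD_natCast, Int.toNat_natCast, hdrop]
    rfl

lemma pvLoop1 (ms : List Int) (g3 : Int → Int → Int → Int) :
    ∀ (fuel : Nat) (a : Nat), ms.length - a = fuel → a ≤ ms.length → ∀ (acc : Int),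
    (PySem.List.pyRange a ms.length).foldl
      (fun r im => pvF2 (g3 (PySem.List.pyGetD ms im 0)) r (ms.drop im.toNat)) acc
    = pvF1 g3 acc (ms.drop a) := by
  intro fuel
  induction fuel with
  | zero =>
    intro a hf ha acc
    have : a = ms.length := by omega
    subst this
    rw [pvPyRange_nil (le_refl _), List.drop_length]
    rfl
  | succ n ih =>
    intro a hf ha acc
    have hlt : a < ms.length := by omega
    rw [PySem.List.pyRange_one_cons (by exact_mod_cast hlt), List.foldl_cons]
    have hcast : ((a : Int) + 1) = ((a + 1 : Nat) : Int) := by push_cast; ring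
    have hdrop : ms.drop a = ms.getD a 0 :: ms.drop (a + 1) := by
      rw [List.drop_eq_getElem_cons hlt, List.getD_eq_getElem _ _ hlt]
    rw [hcast, ih (a + 1) (by omega) (by omega),
        PySem.List.pyGetD_natCast, Int.toNat_natCast, hdrop]
    rfl

lemma pvBFold (l : List Int) : ∀ (x0 p : Int) (b : Int × Int × Int),
    l.foldl
      (fun (s : Int × Option Int × (Int × Int × Int)) x =>
        let b' := match s.2.1 with
          | none => s.2.2
          | some q => if x * q ≤ 0 then pvDp3 s.2.2 s.1 else s.2.2
        (s.1 + x, some x, b'))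
      (p, some x0, b)
    = (p + l.sum, some (l.getLastD x0), (pvFlipVals x0 p l).foldl pvDp3 b) := by
  induction l with
  | nil => intro x0 p b; simp [pvFlipVals]
  | cons x t ih =>
    intro x0 p b
    rw [List.foldl_cons]
    show List.foldl _ (p + x, some x, if x * x0 ≤ 0 then pvDp3 b p else b) t = _
    rw [ih]
    simp only [pvFlipVals, List.getLastD_cons, List.sum_cons]
    rw [Prod.ext_iff, Prod.ext_iff]
    refine ⟨by ring, rfl, ?_⟩
    by_cases h : x * x0 ≤ 0 <;> simp [h]

lemma pvFlipsMap (alist : List Int) :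
    ∀ (fuel : Nat) (a : Nat) (acc : List Int), alist.length - a = fuel → 1 ≤ a → a ≤ alist.length →
    ((PySem.List.pyRange a alist.length).foldl
      (fun acc i =>
        if PySem.List.pyGetD alist i 0 * PySem.List.pyGetD alist (i - 1) 0 ≤ 0
        then acc ++ [i] else acc) acc).map (pvPf alist)
    = acc.map (pvPf alist)
      ++ pvFlipVals (alist.getD (a - 1) 0) (pvPf alist a) (alist.drop a) := by
  intro fuel
  induction fuel with
  | zero =>
    intro a acc hf h1 ha
    have : a = alist.length := by omega
    subst this
    rw [pvPyRange_nil (le_refl _), List.drop_length]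
    simp [pvFlipVals]
  | succ n ih =>
    intro a acc hf h1 ha
    have hlt : a < alist.length := by omega
    rw [PySem.List.pyRange_one_cons (by exact_mod_cast hlt), List.foldl_cons]
    have hcast : ((a : Int) + 1) = ((a + 1 : Nat) : Int) := by push_cast; ring
    have hcast2 : ((a : Int) - 1) = ((a - 1 : Nat) : Int) := by
      have : 1 ≤ a := h1; push_cast [this]; ring
    have hga : PySem.List.pyGetD alist (a : Int) 0 = alist.getD a 0 := PySem.List.pyGetD_natCast _ _ _
    have hga1 : PySem.List.pyGetD alist ((a : Int) - 1) 0 = alist.getD (a - 1) 0 := by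
      rw [hcast2, PySem.List.pyGetD_natCast]
    have hdrop : alist.drop a = alist.getD a 0 :: alist.drop (a + 1) := by
      rw [List.drop_eq_getElem_cons hlt, List.getD_eq_getElem _ _ hlt]
    have hpf : pvPf alist ((a : Int) + 1) = pvPf alist a + alist.getD a 0 := by
      rw [hcast]
      simp only [pvPf, Int.toNat_natCast]
      rw [List.getD_eq_getElem _ _ hlt, List.sum_take_succ _ _ hlt]
    rw [hcast, ih (a + 1) _ (by omega) (by omega) (by omega)]
    rw [hdrop]
    show _ = acc.map (pvPf alist) ++ ((if alist.getD a 0 * alist.getD (a - 1) 0 ≤ 0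
        then [pvPf alist a] else []) ++ pvFlipVals (alist.getD a 0) (pvPf alist a + alist.getD a 0) (alist.drop (a + 1)))
    rw [hga, hga1]
    simp only [Nat.add_sub_cancel]
    rw [← hcast, hpf]
    split_ifs with h <;> simp

lemma pvFlipsSorted (alist : List Int) :
    ∀ (fuel : Nat) (a : Nat) (acc : List Int), alist.length - a = fuel → a ≤ alist.length →
    (∀ x ∈ acc, 0 ≤ x ∧ x < (a : Int)) → acc.Pairwise (· ≤ ·) →
    (∀ x ∈ (PySem.List.pyRange a alist.length).foldl
        (fun acc i =>
          if PySem.List.pyGetD alist i 0 * PySem.List.pyGetD alist (i - 1) 0 ≤ 0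
          then acc ++ [i] else acc) acc, 0 ≤ x ∧ x < (alist.length : Int)) ∧
    ((PySem.List.pyRange a alist.length).foldl
        (fun acc i =>
          if PySem.List.pyGetD alist i 0 * PySem.List.pyGetD alist (i - 1) 0 ≤ 0
          then acc ++ [i] else acc) acc).Pairwise (· ≤ ·) := by
  intro fuel
  induction fuel with
  | zero =>
    intro a acc hf ha hb hp
    have : a = alist.length := by omega
    subst this
    rw [pvPyRange_nil (le_refl _)]
    exact ⟨fun x hx => hb x hx, hp⟩
  | succ n ih =>
    intro a acc hf ha hb hp
    have hlt : a < alist.length := by omega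
    rw [PySem.List.pyRange_one_cons (by exact_mod_cast hlt), List.foldl_cons]
    have hcast : ((a : Int) + 1) = ((a + 1 : Nat) : Int) := by push_cast; ring
    rw [hcast]
    apply ih (a + 1) _ (by omega) (by omega)
    · intro x hx
      split_ifs at hx with h
      · rcases List.mem_append.mp hx with h' | h'
        · have := hb x h'; exact ⟨this.1, by push_cast; omega⟩
        · simp at h'; subst h'; exact ⟨by positivity, by push_cast; omega⟩
      · have := hb x hx; exact ⟨this.1, by push_cast; omega⟩
    · split_ifs with h
      · rw [List.pairwise_append]
        exact ⟨hp, List.pairwise_singleton _ _, fun x hx y hy => by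
          simp at hy; subst hy; exact le_of_lt (hb x hx).2⟩
      · exact hp

lemma pvDp3_char (l : List Int) :
    (∀ i : Nat, i < l.length + 1 → (0 :: l).getD i 0 ≤ (l.foldl pvDp3 (0, 0, 0)).1) ∧
    (∃ i : Nat, i < l.length + 1 ∧ (l.foldl pvDp3 (0, 0, 0)).1 = (0 :: l).getD i 0) ∧
    (∀ i j : Nat, i ≤ j → j < l.length + 1 →
      (0 :: l).getD i 0 - (0 :: l).getD j 0 ≤ (l.foldl pvDp3 (0, 0, 0)).2.1) ∧
    (∃ i j : Nat, i ≤ j ∧ j < l.length + 1 ∧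
      (l.foldl pvDp3 (0, 0, 0)).2.1 = (0 :: l).getD i 0 - (0 :: l).getD j 0) ∧
    (∀ i j k : Nat, i ≤ j → j ≤ k → k < l.length + 1 →
      (0 :: l).getD i 0 - (0 :: l).getD j 0 + (0 :: l).getD k 0 ≤ (l.foldl pvDp3 (0, 0, 0)).2.2) ∧
    (∃ i j k : Nat, i ≤ j ∧ j ≤ k ∧ k < l.length + 1 ∧
      (l.foldl pvDp3 (0, 0, 0)).2.2 = (0 :: l).getD i 0 - (0 :: l).getD j 0 + (0 :: l).getD k 0) := by
  induction l using List.reverseRecOn with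
  | nil =>
    refine ⟨?_, ⟨0, by omega, rfl⟩, ?_, ⟨0, 0, le_refl _, by omega, rfl⟩, ?_,
      ⟨0, 0, 0, le_refl _, le_refl _, by omega, rfl⟩⟩ <;>
    · intros
      simp_all [List.getD]
  | append_singleton l q ih =>
    obtain ⟨b1, a1, b2, a2, b3, a3⟩ := ih
    set st := l.foldl pvDp3 (0, 0, 0) with hst
    set L := (0 : Int) :: l with hLdef
    have hLlen : L.length = l.length + 1 := by simp [hLdef]
    have hfold : (l ++ [q]).foldl pvDp3 (0, 0, 0) = pvDp3 st q := by
      rw [List.foldl_append]; rfl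
    have hL : ((0 : Int) :: (l ++ [q])) = L ++ [q] := rfl
    have hgetlt : ∀ i : Nat, i < L.length → (L ++ [q]).getD i 0 = L.getD i 0 := by
      intro i hi; exact List.getD_append _ _ _ _ hi
    have hgetlast : (L ++ [q]).getD L.length 0 = q := by
      rw [List.getD_eq_getElem _ _ (by simp), List.getElem_append_right (le_refl _)]
      simp
    have hc1 : (pvDp3 st q).1 = max st.1 q := rfl
    have hc2 : (pvDp3 st q).2.1 = max st.2.1 (max st.1 q - q) := rfl
    have hc3 : (pvDp3 st q).2.2 = max st.2.2 (max st.2.1 (max st.1 q - q) + q) := rfl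
    rw [hfold, hL]
    simp only [List.length_append, List.length_cons, List.length_nil, hc1, hc2, hc3]
    -- new lengths: (l.length + 1) + 1 = L.length + 1
    have hlen2 : l.length + 1 + 1 = L.length + 1 := by omega
    -- single
    have nb1 : ∀ i : Nat, i < L.length + 1 → (L ++ [q]).getD i 0 ≤ max st.1 q := by
      intro i hi
      rcases Nat.lt_or_ge i L.length with h | h
      · rw [hgetlt i h]; exact le_trans (b1 i (by omega)) (le_max_left _ _)
      · have : i = L.length := by omega
        subst this; rw [hgetlast]; exact le_max_right _ _
    have na1 : ∃ i : Nat, i < L.length + 1 ∧ max st.1 q = (L ++ [q]).getD i 0 := by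
      rcases le_total st.1 q with h | h
      · exact ⟨L.length, by omega, by rw [hgetlast, max_eq_right h]⟩
      · obtain ⟨i0, hi0, e⟩ := a1
        exact ⟨i0, by omega, by rw [hgetlt i0 (by omega), max_eq_left h, e]⟩
    -- pair
    have nb2 : ∀ i j : Nat, i ≤ j → j < L.length + 1 →
        (L ++ [q]).getD i 0 - (L ++ [q]).getD j 0 ≤ max st.2.1 (max st.1 q - q) := by
      intro i j hij hj
      rcases Nat.lt_or_ge j L.length with h | h
      · rw [hgetlt i (by omega), hgetlt j h]
        exact le_trans (b2 i j hij (by omega)) (le_max_left _ _)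
      · have : j = L.length := by omega
        subst this; rw [hgetlast]
        have := nb1 i (by omega)
        have h2 : (L ++ [q]).getD i 0 - q ≤ max st.1 q - q := by omega
        exact le_trans h2 (le_max_right _ _)
    have na2 : ∃ i j : Nat, i ≤ j ∧ j < L.length + 1 ∧
        max st.2.1 (max st.1 q - q) = (L ++ [q]).getD i 0 - (L ++ [q]).getD j 0 := by
      rcases le_total st.2.1 (max st.1 q - q) with h | h
      · obtain ⟨i0, hi0, e⟩ := na1
        exact ⟨i0, L.length, by omega, by omega, by rw [hgetlast, max_eq_right h, e]⟩
      · obtain ⟨i0, j0, hij, hj0, e⟩ := a2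
        exact ⟨i0, j0, hij, by omega, by
          rw [hgetlt i0 (by omega), hgetlt j0 (by omega), max_eq_left h, e]⟩
    -- triple
    have nb3 : ∀ i j k : Nat, i ≤ j → j ≤ k → k < L.length + 1 →
        (L ++ [q]).getD i 0 - (L ++ [q]).getD j 0 + (L ++ [q]).getD k 0
          ≤ max st.2.2 (max st.2.1 (max st.1 q - q) + q) := by
      intro i j k hij hjk hk
      rcases Nat.lt_or_ge k L.length with h | h
      · rw [hgetlt i (by omega), hgetlt j (by omega), hgetlt k h]
        exact le_trans (b3 i j k hij hjk (by omega)) (le_max_left _ _)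
      · have : k = L.length := by omega
        subst this; rw [hgetlast]
        have := nb2 i j hij (by omega)
        have h2 : (L ++ [q]).getD i 0 - (L ++ [q]).getD j 0 + q
            ≤ max st.2.1 (max st.1 q - q) + q := by omega
        exact le_trans h2 (le_max_right _ _)
    have na3 : ∃ i j k : Nat, i ≤ j ∧ j ≤ k ∧ k < L.length + 1 ∧
        max st.2.2 (max st.2.1 (max st.1 q - q) + q)
          = (L ++ [q]).getD i 0 - (L ++ [q]).getD j 0 + (L ++ [q]).getD k 0 := by
      rcases le_total st.2.2 (max st.2.1 (max st.1 q - q) + q) with h | h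
      · obtain ⟨i0, j0, hij, hj0, e⟩ := na2
        exact ⟨i0, j0, L.length, hij, by omega, by omega, by
          rw [hgetlast, max_eq_right h, e]⟩
      · obtain ⟨i0, j0, k0, hij, hjk, hk0, e⟩ := a3
        exact ⟨i0, j0, k0, hij, hjk, by omega, by
          rw [hgetlt i0 (by omega), hgetlt j0 (by omega), hgetlt k0 (by omega),
              max_eq_left h, e]⟩
    rw [hlen2]
    exact ⟨nb1, by obtain ⟨i, h1, h2⟩ := na1; exact ⟨i, h1, h2⟩,
      nb2, by obtain ⟨i, j, h1, h2, h3⟩ := na2; exact ⟨i, j, h1, h2, h3⟩,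
      nb3, by obtain ⟨i, j, k, h1, h2, h3, h4⟩ := na3; exact ⟨i, j, k, h1, h2, h3, h4⟩⟩

-- A's nested index loops over any list ms compute pvF1 of pvVSlice
lemma pvAgen (alist ms : List Int) :
    (PySem.List.pyRange 0 (PySem.List.len ms)).foldl
      (fun maximum i_marker =>
        let i := PySem.List.pyGetD ms i_marker 0
        (PySem.List.pyRange i_marker (PySem.List.len ms)).foldl
          (fun maximum j_marker =>
            let j := PySem.List.pyGetD ms j_marker 0
            (PySem.List.pyRange j_marker (PySem.List.len ms)).foldl
              (fun maximum k_marker =>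
                let k := PySem.List.pyGetD ms k_marker 0
                let value := (PySem.List.slice alist none (some i)).sum
                  - (PySem.List.slice alist (some i) (some j)).sum
                  + (PySem.List.slice alist (some j) (some k)).sum
                  - (PySem.List.slice alist (some k) none).sum
                if value > maximum then value else maximum)
              maximum)
          maximum)
      alist.sum
    = pvF1 (pvVSlice alist) alist.sum ms := by
  have hmid : ∀ (i : Int) (acc : Int), 0 ≤ i → i ≤ (ms.length : Int) →
      (PySem.List.pyRange i (PySem.List.len ms)).foldl
        (fun maximum j_marker =>
          let j := PySem.List.pyGetD ms j_marker 0
          (PySem.List.pyRange j_marker (PySem.List.len ms)).foldl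
            (fun maximum k_marker =>
              let k := PySem.List.pyGetD ms k_marker 0
              let value := (PySem.List.slice alist none (some (PySem.List.pyGetD ms i 0))).sum
                - (PySem.List.slice alist (some (PySem.List.pyGetD ms i 0)) (some j)).sum
                + (PySem.List.slice alist (some j) (some k)).sum
                - (PySem.List.slice alist (some k) none).sum
              if value > maximum then value else maximum)
            maximum)
        acc
      = pvF2 (pvVSlice alist (PySem.List.pyGetD ms i 0)) acc (ms.drop i.toNat) := by
    intro i acc h0 hile
    have h1 : (PySem.List.pyRange i (PySem.List.len ms)).foldl
        (fun maximum j_marker =>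
          let j := PySem.List.pyGetD ms j_marker 0
          (PySem.List.pyRange j_marker (PySem.List.len ms)).foldl
            (fun maximum k_marker =>
              let k := PySem.List.pyGetD ms k_marker 0
              let value := (PySem.List.slice alist none (some (PySem.List.pyGetD ms i 0))).sum
                - (PySem.List.slice alist (some (PySem.List.pyGetD ms i 0)) (some j)).sum
                + (PySem.List.slice alist (some j) (some k)).sum
                - (PySem.List.slice alist (some k) none).sum
              if value > maximum then value else maximum)
            maximum)
        acc
      = (PySem.List.pyRange i (PySem.List.len ms)).foldl
          (fun r jm => pvF3 (pvVSlice alist (PySem.List.pyGetD ms i 0) (PySem.List.pyGetD ms jm 0)) r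
            (ms.drop jm.toNat)) acc := by
      apply PySem.List.foldl_congr_mem
      intro r jm hjm
      obtain ⟨h0j, _⟩ := PySem.List.mem_pyRange_one.mp hjm
      exact PySem.List.foldl_pyRange_pyGetD ms 0
        (fun r k => if pvVSlice alist (PySem.List.pyGetD ms i 0) (PySem.List.pyGetD ms jm 0) k > r
          then pvVSlice alist (PySem.List.pyGetD ms i 0) (PySem.List.pyGetD ms jm 0) k else r)
        r (le_trans h0 h0j)
    rw [h1]
    obtain ⟨i', rfl⟩ : ∃ i' : Nat, i = (i' : Int) := ⟨i.toNat, (Int.toNat_of_nonneg h0).symm⟩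
    have hle : i' ≤ ms.length := by exact_mod_cast hile
    exact pvLoop2 ms (pvVSlice alist (PySem.List.pyGetD ms i' 0)) (ms.length - i') i' rfl hle acc
  have h2 : (PySem.List.pyRange 0 (PySem.List.len ms)).foldl
      (fun maximum i_marker =>
        let i := PySem.List.pyGetD ms i_marker 0
        (PySem.List.pyRange i_marker (PySem.List.len ms)).foldl
          (fun maximum j_marker =>
            let j := PySem.List.pyGetD ms j_marker 0
            (PySem.List.pyRange j_marker (PySem.List.len ms)).foldl
              (fun maximum k_marker =>
                let k := PySem.List.pyGetD ms k_marker 0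
                let value := (PySem.List.slice alist none (some i)).sum
                  - (PySem.List.slice alist (some i) (some j)).sum
                  + (PySem.List.slice alist (some j) (some k)).sum
                  - (PySem.List.slice alist (some k) none).sum
                if value > maximum then value else maximum)
              maximum)
          maximum)
      alist.sum
    = (PySem.List.pyRange 0 (PySem.List.len ms)).foldl
        (fun r im => pvF2 (pvVSlice alist (PySem.List.pyGetD ms im 0)) r (ms.drop im.toNat))
        alist.sum := by
    apply PySem.List.foldl_congr_mem
    intro r im him
    obtain ⟨h0i, hlti⟩ := PySem.List.mem_pyRange_one.mp him
    have hlti' : im ≤ (ms.length : Int) := le_of_lt hlti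
    exact hmid im r h0i hlti'
  rw [h2]
  exact pvLoop1 ms (pvVSlice alist) ms.length 0 (by omega) (by omega) alist.sum

lemma pvAeq (alist : List Int) :
    find_triplets_medium alist = pvF1 (pvVSlice alist) alist.sum (pvMarkers alist) := by
  exact pvAgen alist (pvMarkers alist)

lemma pvBeq (x0 : Int) (t : List Int) :
    find_triplets_medium_alt (x0 :: t)
      = 2 * (((pvFlipVals x0 x0 t ++ [(x0 :: t).sum]).foldl pvDp3 (0, 0, 0)).2.2)
        - (x0 :: t).sum := by
  show 2 * (pvDp3 (t.foldl _ (0 + x0, some x0, (0, 0, 0))).2.2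
        (t.foldl _ (0 + x0, some x0, (0, 0, 0))).1).2.2 - (x0 :: t).sum = _
  rw [pvBFold t x0 (0 + x0) (0, 0, 0)]
  rw [List.foldl_append]
  simp [List.sum_cons]

lemma pvMain (x0 : Int) (t : List Int) :
    find_triplets_medium (x0 :: t) = find_triplets_medium_alt (x0 :: t) := by
  set al := x0 :: t with hal
  set fv := pvFlipVals x0 x0 t with hfv
  set l := fv ++ [al.sum] with hl
  set ms := pvMarkers al with hms
  have hlen1 : 1 ≤ al.length := by simp [hal]
  -- flips facts
  have hFmap : (pvFlips al).map (pvPf al) = fv := by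
    have h := pvFlipsMap al (al.length - 1) 1 [] (by omega) (le_refl _) hlen1
    have h1 : ((1 : Nat) : Int) = (1 : Int) := by norm_num
    rw [h1] at h
    have h2 : pvFlips al = (PySem.List.pyRange 1 (al.length : Int)).foldl
        (fun acc i =>
          if PySem.List.pyGetD al i 0 * PySem.List.pyGetD al (i - 1) 0 ≤ 0
          then acc ++ [i] else acc) [] := rfl
    have hpf1 : pvPf al (1 : Int) = x0 := by simp [pvPf, hal]
    rw [h2, h, hpf1]
    simp [hal, hfv]
  have hSrt := pvFlipsSorted al (al.length - 1) 1 [] (by omega) hlen1 (by simp) (by simp)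
  have h1 : ((1 : Nat) : Int) = (1 : Int) := by norm_num
  rw [h1] at hSrt
  obtain ⟨hbF, hpF⟩ := hSrt
  have hbF' : ∀ x ∈ pvFlips al, 0 ≤ x ∧ x < (al.length : Int) := hbF
  have hpF' : (pvFlips al).Pairwise (· ≤ ·) := hpF
  -- markers facts
  have hmsdef : ms = 0 :: (pvFlips al ++ [(al.length : Int)]) := rfl
  have hPW : ms.Pairwise (· ≤ ·) := by
    rw [hmsdef]
    refine List.pairwise_cons.mpr ⟨?_, ?_⟩
    · intro y hy
      rcases List.mem_append.mp hy with h | h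
      · exact (hbF' y h).1
      · simp at h; subst h; positivity
    · refine List.pairwise_append.mpr ⟨hpF', List.pairwise_singleton _ _, ?_⟩
      intro x hx y hy
      simp at hy; subst hy
      exact le_of_lt (hbF' x hx).2
  have hBND : ∀ x ∈ ms, 0 ≤ x ∧ x ≤ (al.length : Int) := by
    rw [hmsdef]
    intro x hx
    rcases List.mem_cons.mp hx with h | h
    · subst h; exact ⟨le_refl _, by positivity⟩
    · rcases List.mem_append.mp h with h' | h'
      · have := hbF' x h'; exact ⟨this.1, le_of_lt this.2⟩
      · simp at h'; subst h'; exact ⟨by positivity, le_refl _⟩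
  -- map of markers = 0 :: l
  have hK1 : ms.map (pvPf al) = 0 :: l := by
    rw [hmsdef]
    simp only [List.map_cons, List.map_append, List.map_cons, List.map_nil, hFmap]
    have hpf0 : pvPf al (0 : Int) = 0 := rfl
    have hpfn : pvPf al ((al.length : Nat) : Int) = al.sum := by
      simp [pvPf]
    rw [hpf0, hpfn, hl]
  have hmslen : ms.length = l.length + 1 := by
    have h := congrArg List.length hK1
    simp only [List.length_map, List.length_cons] at h
    omega
  -- index monotonicity and bounds
  have hmem : ∀ idx : Nat, idx < ms.length → ms.getD idx 0 ∈ ms := by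
    intro idx h
    rw [List.getD_eq_getElem _ _ h]
    exact List.getElem_mem h
  have hmono : ∀ i j : Nat, i ≤ j → j < ms.length → ms.getD i 0 ≤ ms.getD j 0 := by
    intro i j hij hj
    rcases Nat.lt_or_ge i j with h | h
    · rw [List.getD_eq_getElem _ _ (by omega), List.getD_eq_getElem _ _ hj]
      exact List.pairwise_iff_getElem.mp hPW i j (by omega) hj h
    · have : i = j := by omega
      subst this; exact le_refl _
  have hQ : ∀ idx : Nat, idx < ms.length → (0 :: l).getD idx 0 = pvPf al (ms.getD idx 0) := by
    intro idx h
    rw [← hK1, List.getD_eq_getElem _ _ (by simpa using h), List.getD_eq_getElem _ _ h]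
    simp
  -- the bridge
  have hbridge : ∀ i j k : Nat, i ≤ j → j ≤ k → k < ms.length →
      pvVSlice al (ms.getD i 0) (ms.getD j 0) (ms.getD k 0)
        = 2 * ((0 :: l).getD i 0 - (0 :: l).getD j 0 + (0 :: l).getD k 0) - al.sum := by
    intro i j k hij hjk hk
    have h0i : 0 ≤ ms.getD i 0 := (hBND _ (hmem i (by omega))).1
    have hij' : ms.getD i 0 ≤ ms.getD j 0 := hmono i j hij (by omega)
    have hjk' : ms.getD j 0 ≤ ms.getD k 0 := hmono j k hjk hk
    rw [pvVSlice_eq al h0i hij' hjk', hQ i (by omega), hQ j (by omega), hQ k hk]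
  -- characterizations
  obtain ⟨hge, hbd, hat⟩ := pvF1_char (pvVSlice al) ms al.sum
  obtain ⟨_, _, _, _, db, da⟩ := pvDp3_char l
  have hA : find_triplets_medium al = pvF1 (pvVSlice al) al.sum ms := pvAeq al
  have hB : find_triplets_medium_alt al
      = 2 * ((l.foldl pvDp3 (0, 0, 0)).2.2) - al.sum := pvBeq x0 t
  set W := (l.foldl pvDp3 (0, 0, 0)).2.2 with hW
  -- S ≤ W
  have hLlast : (0 :: l).getD (fv.length + 1) 0 = al.sum := by
    show l.getD fv.length 0 = al.sum
    rw [hl]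
    rw [List.getD_eq_getElem _ _ (by simp)]
    rw [List.getElem_append_right (le_refl _)]
    simp
  have hllen : l.length = fv.length + 1 := by simp [hl]
  have hSW : al.sum ≤ W := by
    have := db 0 0 (fv.length + 1) (le_refl _) (by omega) (by omega)
    rw [hLlast] at this
    simpa using this
  rw [hA, hB]
  apply le_antisymm
  · rcases hat with h | ⟨i, j, k, hij, hjk, hk, he⟩
    · rw [h]; omega
    · rw [he, hbridge i j k hij hjk hk]
      have := db i j k hij hjk (by omega)
      omega
  · obtain ⟨i, j, k, hij, hjk, hk, he⟩ := da
    have hb := hbd i j k hij hjk (by omega)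
    rw [hbridge i j k hij hjk (by omega)] at hb
    omega

-- ===== VERDICT (by name: the statement is the Claim_ definition above) =====
theorem find_triplets_medium_spec : Claim_equal_find_triplets_medium := by
  intro alist _
  unfold Spec_find_triplets_medium
  cases alist with
  | nil => decide
  | cons x0 t => exact pvMain x0 t
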